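-- pv_equiv track=rewrite | github.com/itsZapp/git-art | git_art_pro.py | stylize
-- ===== SOURCE A (Python) =====
-- def stylize(grid):
--     styled = []
--     for r, row in enumerate(grid):
--         new_row = ""
--         for c, ch in enumerate(row):
--             if ch == "#":
--                 if r == 0 or r == len(grid) - 1:
--                     new_row += "#"
--                 else:
--                     p = (r * 3 + c * 5) % 5
--                     if p == 0:
--                         new_row += "#"
--                     elif p == 1:
--                         new_row += "*"
--                     elif p == 2:
--                         new_row += ":"
--                     elif p == 3:
--                         new_row += "."
--                     else:
--                         new_row += "#"
--             else:
--                 new_row += " "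
--         styled.append(new_row)
--     return styled
-- ===== SOURCE B (Python) =====
-- def stylize(grid):
--     cycle = "#.*#:"
--     last = len(grid) - 1
--     out = []
--     for r, row in enumerate(grid):
--         fill = "#" if r == 0 or r == last else cycle[r % 5]
--         out.append(fill.join(" " * len(seg) for seg in row.split("#")))
--     return out
-- ===== Notes on version B (the rewrite author's own statement) =====
-- stated objective: alternative
-- what changed: B replaces A's per-cell enumerate/branch loop entirely: it splits each row on '#', turns each '#'-free segment into a same-length run of spaces, and joins the segments with the row's fill character (split/join instead of a per-cell if-chain), the fill coming from a precomputed period-5 cycle string "#.*#:"[r % 5] instead of (r*3+c*5)%5 arithmetic.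
import Mathlib
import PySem

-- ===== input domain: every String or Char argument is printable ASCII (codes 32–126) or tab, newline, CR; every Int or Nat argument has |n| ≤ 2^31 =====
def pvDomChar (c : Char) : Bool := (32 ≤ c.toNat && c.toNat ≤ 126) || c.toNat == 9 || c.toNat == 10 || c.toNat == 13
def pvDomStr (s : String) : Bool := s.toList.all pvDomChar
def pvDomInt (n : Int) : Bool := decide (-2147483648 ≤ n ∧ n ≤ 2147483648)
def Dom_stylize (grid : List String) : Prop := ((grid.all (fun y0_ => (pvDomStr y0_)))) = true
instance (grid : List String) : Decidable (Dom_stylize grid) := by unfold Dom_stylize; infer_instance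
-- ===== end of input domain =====

-- B builds each output row by splitting it on '#', replacing each '#'-free segment by a
-- same-length run of spaces and joining with a per-row fill char from the cycle "#.*#:"[r%5]:
-- an alternative split/join algorithm with no per-cell branch or arithmetic.

-- ===== PORT A =====
def stylize (grid : List String) : List String :=
  (PySem.List.enumerate grid 0).foldl (fun styled rr =>
    let r := rr.1
    let row := rr.2
    let new_row := (PySem.List.enumerate row.toList 0).foldl (fun new_row cc =>
      let c := cc.1
      let ch := cc.2
      if ch = '#' then
        if r = 0 ∨ r = (grid.length : Int) - 1 then new_row ++ ['#']
        else
          let p := PySem.Int.mod (r * 3 + c * 5) 5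
          if p = 0 then new_row ++ ['#']
          else if p = 1 then new_row ++ ['*']
          else if p = 2 then new_row ++ [':']
          else if p = 3 then new_row ++ ['.']
          else new_row ++ ['#']
      else new_row ++ [' ']) ([] : List Char)
    styled ++ [String.ofList new_row]) []

-- ===== PORT B =====
def stylize_alt (grid : List String) : List String :=
  let cycle := "#.*#:"
  let last := (grid.length : Int) - 1
  (PySem.List.enumerate grid 0).foldl (fun out rr =>
    let r := rr.1
    let row := rr.2
    -- cycle[r % 5]: r ≥ 0 so the index is always in range; getD only makes the lookup total
    let fill : Char := if r = 0 ∨ r = last then '#'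
                       else PySem.List.pyGetD cycle.toList (PySem.Int.mod r 5) '#'
    out ++ [String.ofList (PySem.Chars.join [fill]
      ((PySem.Chars.splitOn row.toList ['#']).map (fun seg => List.replicate seg.length ' ')))]) []

-- ===== PRECONDITION & SPEC =====
def Spec_stylize (grid : List String) (out : List String) : Prop := out = stylize_alt grid
instance (grid : List String) (out : List String) : Decidable (Spec_stylize grid out) := by unfold Spec_stylize; infer_instance

-- ===== CLAIM =====
def Claim_equal_stylize : Prop := ∀ (grid : List String), Dom_stylize grid → Spec_stylize grid (stylize grid)

-- ===== LEMMAS AND PROOFS =====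

-- the per-cell character A appends
def cellA (nGrid : Int) (r c : Int) (ch : Char) : Char :=
  if ch = '#' then
    if r = 0 ∨ r = nGrid - 1 then '#'
    else
      let p := PySem.Int.mod (r * 3 + c * 5) 5
      if p = 0 then '#'
      else if p = 1 then '*'
      else if p = 2 then ':'
      else if p = 3 then '.'
      else '#'
  else ' '

-- B's per-row fill character
def fillB (nGrid r : Int) : Char :=
  if r = 0 ∨ r = nGrid - 1 then '#'
  else PySem.List.pyGetD ("#.*#:").toList (PySem.Int.mod r 5) '#'

lemma cellA_eq_fill (nGrid r c : Int) (ch : Char) :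
    cellA nGrid r c ch = if ch = '#' then fillB nGrid r else ' ' := by
  unfold cellA fillB
  by_cases hch : ch = '#'
  · simp only [hch]
    by_cases hb : r = 0 ∨ r = nGrid - 1
    · simp [hb]
    · simp only [if_neg hb]
      rw [PySem.Int.mod_eq_emod_of_pos (by omega : (0:Int) < 5),
          PySem.Int.mod_eq_emod_of_pos (by omega : (0:Int) < 5)]
      have h0 : 0 ≤ r % 5 := Int.emod_nonneg _ (by omega)
      have h5 : r % 5 < 5 := Int.emod_lt_of_pos _ (by omega)
      have h2 : (r * 3 + c * 5) % 5 = (r % 5 * 3) % 5 := by omega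
      rw [h2]
      interval_cases h : (r % 5) <;>
        simp [PySem.List.pyGetD, PySem.List.pyIdx?, PySem.List.pyGet?]
  · simp [hch]

-- A's inner loop produces the pointwise map over the row
lemma inner_eq (nGrid r : Int) (cs : List Char) : ∀ (c0 : Int) (acc : List Char),
    (PySem.List.enumerate cs c0).foldl (fun new_row cc =>
      if cc.2 = '#' then
        if r = 0 ∨ r = nGrid - 1 then new_row ++ ['#']
        else
          let p := PySem.Int.mod (r * 3 + cc.1 * 5) 5
          if p = 0 then new_row ++ ['#']
          else if p = 1 then new_row ++ ['*']
          else if p = 2 then new_row ++ [':']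
          else if p = 3 then new_row ++ ['.']
          else new_row ++ ['#']
      else new_row ++ [' ']) acc
    = acc ++ cs.map (fun ch => if ch = '#' then fillB nGrid r else ' ') := by
  induction cs with
  | nil => intro c0 acc; simp [PySem.List.enumerate_nil]
  | cons x xs ih =>
    intro c0 acc
    rw [PySem.List.enumerate_cons]
    simp only [List.foldl_cons, List.map_cons]
    have hstep : (if x = '#' then
        if r = 0 ∨ r = nGrid - 1 then acc ++ ['#']
        else
          let p := PySem.Int.mod (r * 3 + c0 * 5) 5
          if p = 0 then acc ++ ['#']
          else if p = 1 then acc ++ ['*']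
          else if p = 2 then acc ++ [':']
          else if p = 3 then acc ++ ['.']
          else acc ++ ['#']
      else acc ++ [' ']) = acc ++ [if x = '#' then fillB nGrid r else ' '] := by
      rw [← cellA_eq_fill nGrid r c0]
      unfold cellA
      split_ifs <;> (try rfl) ; simp only [apply_ite (fun y : Char => acc ++ [y])]
    rw [hstep, ih]
    simp

-- reference splitter: splitSpec pre cs = the '#'-separated pieces of cs, pre prepended to the first
def splitSpec (pre : List Char) : List Char → List (List Char)
  | [] => [pre]
  | c :: rest => if c = '#' then pre :: splitSpec [] rest else splitSpec (pre ++ [c]) rest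

lemma splitSpec_ne_nil (pre : List Char) (cs : List Char) : splitSpec pre cs ≠ [] := by
  induction cs generalizing pre with
  | nil => simp [splitSpec]
  | cons c rest ih =>
    simp only [splitSpec]
    split_ifs <;> simp [ih]

-- PySem's fueled split agrees with splitSpec
lemma go_eq_splitSpec (cs : List Char) : ∀ (fuel : Nat) (cur : List Char) (acc : List (List Char)),
    cs.length < fuel →
    PySem.Chars.splitOn.go ['#'] fuel cs cur acc = acc.reverse ++ splitSpec cur.reverse cs := by
  induction cs with
  | nil =>
    intro fuel cur acc h
    match fuel with
    | Nat.succ f => simp [PySem.Chars.splitOn.go, splitSpec]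
  | cons c rest ih =>
    intro fuel cur acc h
    match fuel with
    | Nat.succ f =>
      rw [PySem.Chars.splitOn.go]
      by_cases hc : c = '#'
      · have hp : List.isPrefixOf ['#'] (c :: rest) = true := by
          simp [List.isPrefixOf, hc]
        subst hc
        rw [if_pos hp]
        simp only [List.length_singleton, List.drop_one, List.tail_cons]
        rw [ih f [] (cur.reverse :: acc) (by simpa using Nat.lt_of_succ_lt_succ h)]
        simp [splitSpec]
      · have hp : List.isPrefixOf ['#'] (c :: rest) = false := by
          simp [List.isPrefixOf]; exact fun h' => (hc h'.symm).elim
        simp only [hp, Bool.false_eq_true, if_false]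
        rw [ih f (c :: cur) acc (by simpa using Nat.lt_of_succ_lt_succ h)]
        simp [splitSpec, hc]

lemma splitOn_eq_splitSpec (cs : List Char) :
    PySem.Chars.splitOn cs ['#'] = splitSpec [] cs := by
  unfold PySem.Chars.splitOn
  rw [go_eq_splitSpec cs (cs.length + 1) [] [] (Nat.lt_succ_self _)]
  simp

-- joining the blanked pieces with the fill char is the pointwise map
lemma join_splitSpec (f : Char) (cs : List Char) : ∀ (pre : List Char),
    PySem.Chars.join [f] ((splitSpec pre cs).map (fun seg => List.replicate seg.length ' '))
    = List.replicate pre.length ' ' ++ cs.map (fun ch => if ch = '#' then f else ' ') := by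
  induction cs with
  | nil => intro pre; simp [splitSpec, PySem.Chars.join, List.intercalate]
  | cons c rest ih =>
    intro pre
    simp only [splitSpec]
    by_cases hc : c = '#'
    · simp only [hc, if_pos, List.map_cons]
      obtain ⟨p, ps, hps⟩ : ∃ p ps, splitSpec ([] : List Char) rest = p :: ps := by
        cases hs : splitSpec ([] : List Char) rest with
        | nil => exact absurd hs (splitSpec_ne_nil _ _)
        | cons p ps => exact ⟨p, ps, rfl⟩
      rw [hps, List.map_cons, PySem.Chars.join_cons_cons]
      have := ih []
      rw [hps] at this
      simp only [List.map_cons] at this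
      rw [this]
      simp
    · simp only [if_neg hc]
      rw [ih (pre ++ [c])]
      simp only [List.length_append, List.length_cons, List.length_nil, List.map_cons,
        if_neg hc]
      rw [List.replicate_add]
      simp

-- ===== VERDICT =====
theorem stylize_spec : Claim_equal_stylize := by
  intro grid _
  unfold Spec_stylize stylize stylize_alt
  rw [PySem.List.foldl_append_singleton_eq_map, PySem.List.foldl_append_singleton_eq_map]
  apply List.map_congr_left
  intro rr _
  simp only
  rw [inner_eq grid.length rr.1 rr.2.toList 0 []]
  rw [splitOn_eq_splitSpec, join_splitSpec]
  simp only [List.length_nil, List.replicate_zero, List.nil_append]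
  congr 1
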